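-- pv_equiv track=rewrite | github.com/kkafar/ageom-projekt | convexhull/lib/util.py | tangent
-- ===== SOURCE A (Python) =====
-- def det(a,b,c):
--     return a[0]*b[1]-a[0]*c[1]-b[0]*a[1]+b[0]*c[1]+c[0]*a[1]-c[0]*b[1]
--
-- def tangent(p, Q, accur=0):  # Q-zbior punktow w formie otoczki
--     # wykorzystujemy binary search na otoczce - jesli dany wierzcholek jest po prawej stronie punktu tworzacej styczna
--     # lewostronna z p,
--     ln = len(Q)
--
--     def tangetUtil(p, Q, l, r):
--         if r < l:  # zdarza sie tylko, gdy punkt jest wewnatrz otoczki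
--             return None
--
--         mid = (l + r) // 2
--         if det(Q[0], Q[1], p) > 0 and det(Q[ln - 1], Q[0], p) > 0:
--             if (det(Q[0], p, Q[mid]) < 0) or (det(p, Q[mid], Q[(mid + 1) % ln]) < 0 and \
--                                               det(p, Q[mid], Q[(mid - 1) % ln]) < 0) or \
--                     (det(p, Q[mid], Q[(mid + 1) % ln]) < 0 and det(p, Q[mid], Q[(mid - 1) % ln]) >= 0):
--                 return tangetUtil(p, Q, mid + 1, r)
--
--         else:
--             if det(Q[0], p, Q[mid]) >= 0 and \
--                     ((det(p, Q[mid], Q[(mid + 1) % ln]) < 0 and det(p, Q[mid], Q[(mid - 1) % ln]) >= 0) or \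
--                      (det(p, Q[mid], Q[(mid + 1) % ln]) < 0 and det(p, Q[mid], Q[
--                          (mid - 1) % ln]) < 0)):  # chyba nie potrzebne sprawdz na koncu
--                 return tangetUtil(p, Q, mid + 1, r)
--
--         if det(p, Q[mid], Q[(mid + 1) % ln]) >= 0 and det(p, Q[mid], Q[(mid - 1) % ln]) >= 0 \
--                 or (det(p, Q[mid], Q[(mid + 1) % ln]) == 0 and (Q[mid][0] <= p[0] <= Q[(mid + 1) % ln][0]) and \
--                     (Q[mid][1] <= p[1] <= Q[(mid + 1) % ln][1])):
--
--             while (det(p, Q[mid], Q[(mid + 1) % ln]) == 0):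
--                 mid = (mid + 1) % ln  # jesli jest styczna wspolliniowa, to bierzmy pod uwage punkt blizszy
--             return mid
--
--         else:
--             return tangetUtil(p, Q, l, mid - 1)
--
--
--     return tangetUtil(p, Q, 0, ln - 1)
-- ===== SOURCE B (Python) =====
-- # Iterative binary search (explicit l/r loop) instead of A's recursive helper;
-- # same orientation tests with the redundant prev-det disjunctions collapsed.
-- def det(a, b, c):
--     return (b[0] - a[0]) * (c[1] - a[1]) - (b[1] - a[1]) * (c[0] - a[0])
--
-- def tangent(p, Q, accur=0):
--     ln = len(Q)
--     if ln == 0: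
--         return None
--     upper = det(Q[0], Q[1], p) > 0 and det(Q[-1], Q[0], p) > 0
--     l, r = 0, ln - 1
--     while l <= r:
--         mid = (l + r) // 2
--         dn = det(p, Q[mid], Q[(mid + 1) % ln])
--         dp_ = det(p, Q[mid], Q[(mid - 1) % ln])
--         d0 = det(Q[0], p, Q[mid])
--         go_right = (d0 < 0 or dn < 0) if upper else (d0 >= 0 and dn < 0)
--         if go_right:
--             l = mid + 1
--         elif (dn >= 0 and dp_ >= 0) or (dn == 0
--                 and Q[mid][0] <= p[0] <= Q[(mid + 1) % ln][0]
--                 and Q[mid][1] <= p[1] <= Q[(mid + 1) % ln][1]):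
--             while det(p, Q[mid], Q[(mid + 1) % ln]) == 0:
--                 mid = (mid + 1) % ln
--             return mid
--         else:
--             r = mid - 1
--     return None
-- ===== Notes on version B (the rewrite author's own statement) =====
-- stated objective: idiomatic
-- what changed: The recursive inner helper tangetUtil is replaced by an iterative l/r binary-search loop with the orientation tests computed once per iteration into locals, the 'upper' test hoisted out of the loop, the redundant prev-det disjunctions collapsed (the go-right tests reduce to d0<0 or dn<0 resp. d0>=0 and dn<0), and det rewritten in cross-product form.
import Mathlib
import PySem

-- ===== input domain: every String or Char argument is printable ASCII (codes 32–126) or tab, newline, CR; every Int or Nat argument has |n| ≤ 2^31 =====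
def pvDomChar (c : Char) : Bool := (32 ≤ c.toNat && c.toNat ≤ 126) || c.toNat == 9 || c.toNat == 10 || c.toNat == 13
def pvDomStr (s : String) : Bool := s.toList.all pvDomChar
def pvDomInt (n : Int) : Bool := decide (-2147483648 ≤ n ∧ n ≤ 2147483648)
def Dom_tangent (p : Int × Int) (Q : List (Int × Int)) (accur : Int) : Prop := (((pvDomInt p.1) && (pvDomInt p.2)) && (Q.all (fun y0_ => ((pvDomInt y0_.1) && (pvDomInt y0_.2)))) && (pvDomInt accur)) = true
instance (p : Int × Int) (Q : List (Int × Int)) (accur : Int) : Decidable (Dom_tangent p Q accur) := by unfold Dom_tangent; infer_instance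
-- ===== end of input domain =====

-- B replaces the recursive binary-search helper by an iterative l/r loop with the
-- redundant prev-det disjunctions collapsed; return values are identical on Pre_.

-- ===== PORT A =====
-- shared index helper: Q[i]; within Pre_ every index this file uses is in range,
-- so the (0,0) default is never taken (Python raises IndexError out of range).
def pyAt (Q : List (Int × Int)) (i : Int) : Int × Int := (PySem.List.pyGet? Q i).getD (0, 0)

def detA (a b c : Int × Int) : Int :=
  a.1 * b.2 - a.1 * c.2 - b.1 * a.2 + b.1 * c.2 + c.1 * a.2 - c.1 * b.2

-- the inner 'while det == 0: mid = (mid+1)%ln' advance; fuel ln suffices under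
-- Pre_ (some consecutive det is nonzero); Python diverges exactly where fuel would
-- run out, and Pre_ excludes those inputs.
def advA (p : Int × Int) (Q : List (Int × Int)) (ln : Int) : Nat → Int → Int
  | 0, mid => mid
  | f + 1, mid =>
    if detA p (pyAt Q mid) (pyAt Q (PySem.Int.mod (mid + 1) ln)) = 0 then
      advA p Q ln f (PySem.Int.mod (mid + 1) ln)
    else mid

-- literal transliteration of tangetUtil; fuel (len Q + 1) bounds the recursion
-- depth (the interval r-l+1 ≤ len Q strictly shrinks each call), so fuel never
-- runs out on the calls tangent makes.
def tangetUtilA (p : Int × Int) (Q : List (Int × Int)) (ln : Int) : Nat → Int → Int → Option Int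
  | 0, _, _ => none
  | f + 1, l, r =>
    if r < l then none
    else
      let mid := PySem.Int.floordiv (l + r) 2
      let goRight : Bool :=
        if detA (pyAt Q 0) (pyAt Q 1) p > 0 ∧ detA (pyAt Q (ln - 1)) (pyAt Q 0) p > 0 then
          decide (detA (pyAt Q 0) p (pyAt Q mid) < 0 ∨
            (detA p (pyAt Q mid) (pyAt Q (PySem.Int.mod (mid + 1) ln)) < 0 ∧
             detA p (pyAt Q mid) (pyAt Q (PySem.Int.mod (mid - 1) ln)) < 0) ∨
            (detA p (pyAt Q mid) (pyAt Q (PySem.Int.mod (mid + 1) ln)) < 0 ∧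
             detA p (pyAt Q mid) (pyAt Q (PySem.Int.mod (mid - 1) ln)) ≥ 0))
        else
          decide (detA (pyAt Q 0) p (pyAt Q mid) ≥ 0 ∧
            ((detA p (pyAt Q mid) (pyAt Q (PySem.Int.mod (mid + 1) ln)) < 0 ∧
              detA p (pyAt Q mid) (pyAt Q (PySem.Int.mod (mid - 1) ln)) ≥ 0) ∨
             (detA p (pyAt Q mid) (pyAt Q (PySem.Int.mod (mid + 1) ln)) < 0 ∧
              detA p (pyAt Q mid) (pyAt Q (PySem.Int.mod (mid - 1) ln)) < 0)))
      if goRight then tangetUtilA p Q ln f (mid + 1) r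
      else if (detA p (pyAt Q mid) (pyAt Q (PySem.Int.mod (mid + 1) ln)) ≥ 0 ∧
               detA p (pyAt Q mid) (pyAt Q (PySem.Int.mod (mid - 1) ln)) ≥ 0) ∨
              (detA p (pyAt Q mid) (pyAt Q (PySem.Int.mod (mid + 1) ln)) = 0 ∧
               ((pyAt Q mid).1 ≤ p.1 ∧ p.1 ≤ (pyAt Q (PySem.Int.mod (mid + 1) ln)).1) ∧
               ((pyAt Q mid).2 ≤ p.2 ∧ p.2 ≤ (pyAt Q (PySem.Int.mod (mid + 1) ln)).2)) then
        some (advA p Q ln Q.length mid)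
      else tangetUtilA p Q ln f l (mid - 1)

def tangent (p : Int × Int) (Q : List (Int × Int)) (accur : Int) : Option Int :=
  tangetUtilA p Q (Q.length : Int) (Q.length + 1) 0 ((Q.length : Int) - 1)

-- ===== PORT B =====
def detB (a b c : Int × Int) : Int :=
  (b.1 - a.1) * (c.2 - a.2) - (b.2 - a.2) * (c.1 - a.1)

def advB (p : Int × Int) (Q : List (Int × Int)) (ln : Int) : Nat → Int → Int
  | 0, mid => mid
  | f + 1, mid =>
    if detB p (pyAt Q mid) (pyAt Q (PySem.Int.mod (mid + 1) ln)) = 0 then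
      advB p Q ln f (PySem.Int.mod (mid + 1) ln)
    else mid

-- Source B's 'while l <= r' loop; fuel (len Q + 1) bounds the iteration count.
def loopB (p : Int × Int) (Q : List (Int × Int)) (ln : Int) (upper : Bool) :
    Nat → Int → Int → Option Int
  | 0, _, _ => none
  | f + 1, l, r =>
    if l ≤ r then
      let mid := PySem.Int.floordiv (l + r) 2
      let dn := detB p (pyAt Q mid) (pyAt Q (PySem.Int.mod (mid + 1) ln))
      let dpv := detB p (pyAt Q mid) (pyAt Q (PySem.Int.mod (mid - 1) ln))
      let d0 := detB (pyAt Q 0) p (pyAt Q mid)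
      let goRight : Bool := if upper then decide (d0 < 0 ∨ dn < 0) else decide (d0 ≥ 0 ∧ dn < 0)
      if goRight then loopB p Q ln upper f (mid + 1) r
      else if (dn ≥ 0 ∧ dpv ≥ 0) ∨
              (dn = 0 ∧
               ((pyAt Q mid).1 ≤ p.1 ∧ p.1 ≤ (pyAt Q (PySem.Int.mod (mid + 1) ln)).1) ∧
               ((pyAt Q mid).2 ≤ p.2 ∧ p.2 ≤ (pyAt Q (PySem.Int.mod (mid + 1) ln)).2)) then
        some (advB p Q ln Q.length mid)
      else loopB p Q ln upper f l (mid - 1)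
    else none

def tangent_alt (p : Int × Int) (Q : List (Int × Int)) (accur : Int) : Option Int :=
  if Q.length = 0 then none
  else
    let ln : Int := Q.length
    let upper : Bool :=
      decide (detB (pyAt Q 0) (pyAt Q 1) p > 0 ∧ detB (pyAt Q (-1)) (pyAt Q 0) p > 0)
    loopB p Q ln upper (Q.length + 1) 0 (ln - 1)

-- ===== PRECONDITION & SPEC =====
-- Pre_ excludes exactly the inputs where Python A does not return: len Q = 1
-- (IndexError at Q[1]) and len Q ≥ 2 with every consecutive det(p,Q[i],Q[i+1])
-- zero (the inner while loop never terminates). len Q = 0 returns None and stays inside.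
def detP (a b c : Int × Int) : Int :=
  a.1 * b.2 - a.1 * c.2 - b.1 * a.2 + b.1 * c.2 + c.1 * a.2 - c.1 * b.2
def pyAtP (Q : List (Int × Int)) (i : Int) : Int × Int := (PySem.List.pyGet? Q i).getD (0, 0)
def Pre_tangent (p : Int × Int) (Q : List (Int × Int)) (accur : Int) : Prop :=
  Q = [] ∨ (2 ≤ Q.length ∧
    ∃ i ∈ List.range Q.length,
      detP p (pyAtP Q (i : Int)) (pyAtP Q (PySem.Int.mod ((i : Int) + 1) Q.length)) ≠ 0)
instance (p : Int × Int) (Q : List (Int × Int)) (accur : Int) : Decidable (Pre_tangent p Q accur) := by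
  unfold Pre_tangent; infer_instance

def pvWitness_tangent : (Int × Int) × (List (Int × Int)) × Int :=
  ((5, 2), [(0, 0), (1, 0), (1, 1), (0, 1)], 0)

def Spec_tangent (p : Int × Int) (Q : List (Int × Int)) (accur : Int) (out : Option Int) : Prop := out = tangent_alt p Q accur
instance (p : Int × Int) (Q : List (Int × Int)) (accur : Int) (out : Option Int) : Decidable (Spec_tangent p Q accur out) := by unfold Spec_tangent; infer_instance

-- ===== CLAIM (what is proved, stated in full; the proofs are below) =====
def Claim_equal_tangent : Prop := ∀ (p : Int × Int) (Q : List (Int × Int)) (accur : Int), Dom_tangent p Q accur → Pre_tangent p Q accur → Spec_tangent p Q accur (tangent p Q accur)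

-- ===== LEMMAS AND PROOFS =====
theorem detB_eq (a b c : Int × Int) : detB a b c = detA a b c := by
  unfold detA detB; ring

theorem adv_eq (p : Int × Int) (Q : List (Int × Int)) (ln : Int) (f : Nat) (mid : Int) :
    advA p Q ln f mid = advB p Q ln f mid := by
  induction f generalizing mid with
  | zero => rfl
  | succ f ih => simp only [advA, advB, detB_eq]; split <;> simp [ih]

theorem loop_eq (p : Int × Int) (Q : List (Int × Int)) (ln : Int) (f : Nat) (l r : Int) :
    tangetUtilA p Q ln f l r =
      loopB p Q ln
        (decide (detA (pyAt Q 0) (pyAt Q 1) p > 0 ∧ detA (pyAt Q (ln - 1)) (pyAt Q 0) p > 0))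
        f l r := by
  induction f generalizing l r with
  | zero => rfl
  | succ f ih =>
    simp only [tangetUtilA, loopB, detB_eq]
    by_cases hlr : r < l
    · simp [hlr, not_le.mpr hlr]
    · have hle : l ≤ r := not_lt.mp hlr
      simp only [if_neg hlr, if_pos hle]
      set mid := PySem.Int.floordiv (l + r) 2 with hmid
      set dn := detA p (pyAt Q mid) (pyAt Q (PySem.Int.mod (mid + 1) ln)) with hdn
      set dpv := detA p (pyAt Q mid) (pyAt Q (PySem.Int.mod (mid - 1) ln)) with hdpv
      set d0 := detA (pyAt Q 0) p (pyAt Q mid) with hd0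
      by_cases hU : detA (pyAt Q 0) (pyAt Q 1) p > 0 ∧ detA (pyAt Q (ln - 1)) (pyAt Q 0) p > 0
      · have hg : (d0 < 0 ∨ (dn < 0 ∧ dpv < 0) ∨ (dn < 0 ∧ dpv ≥ 0)) ↔ (d0 < 0 ∨ dn < 0) := by
          omega
        simp only [if_pos hU, decide_eq_true_eq, decide_eq_decide.mpr hg]
        split
        · exact ih (mid + 1) r
        · split
          · simp [adv_eq]
          · exact ih l (mid - 1)
      · have hg : (d0 ≥ 0 ∧ ((dn < 0 ∧ dpv ≥ 0) ∨ (dn < 0 ∧ dpv < 0))) ↔ (d0 ≥ 0 ∧ dn < 0) := by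
          omega
        simp only [if_neg hU, decide_eq_true_eq, decide_eq_decide.mpr hg]
        split
        · exact ih (mid + 1) r
        · split
          · simp [adv_eq]
          · exact ih l (mid - 1)

theorem pyAt_last (Q : List (Int × Int)) (h : Q ≠ []) :
    pyAt Q ((Q.length : Int) - 1) = pyAt Q (-1) := by
  have hpos : 0 < Q.length := List.length_pos_of_ne_nil h
  unfold pyAt
  rw [PySem.List.pyGet?_neg_one,
    show ((Q.length : Int) - 1) = ((Q.length - 1 : Nat) : Int) by omega,
    PySem.List.pyGet?_natCast, List.getLast?_eq_getElem?]

-- ===== VERDICT (by name: the statement is the Claim_ definition above) =====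
theorem tangent_spec : Claim_equal_tangent := by
  intro p Q accur _ hpre
  unfold Spec_tangent tangent tangent_alt
  by_cases h0 : Q.length = 0
  · have hQ : Q = [] := List.length_eq_zero_iff.mp h0
    subst hQ
    simp [tangetUtilA]
  · have hne : Q ≠ [] := fun h => h0 (by simp [h])
    rw [if_neg h0]
    simp only [detB_eq]
    rw [loop_eq p Q (Q.length : Int), pyAt_last Q hne]
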